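-- pv_equiv track=rewrite | github.com/HONOOUR/Algorithm_Test | Algorithm_Python/old/test.py | solution
-- ===== SOURCE A (Python) =====
-- def solution(cards):
--     for i in range(len(cards)):
--         kero = 0
--         berony = 0
--         temp = list.copy(cards)
--         temp.pop(i)
--         card_index = 0
--         while card_index < len(temp):
--             if card_index % 2 == 0:
--                 kero += temp[card_index]
--             else:
--                 berony += temp[card_index]
--             card_index += 1
--         if kero == berony:
--             return i+1
--     return -1
-- ===== SOURCE B (Python) =====
-- def solution(cards):
--     n = len(cards)
--     suf = [0] * (n + 1)
--     for j in range(n - 1, -1, -1):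
--         suf[j] = cards[j] - suf[j + 1]
--     pre = 0
--     sign = 1
--     for i in range(n):
--         if pre + sign * suf[i + 1] == 0:
--             return i + 1
--         pre += sign * cards[i]
--         sign = -sign
--     return -1
-- ===== Notes on version B (the rewrite author's own statement) =====
-- stated objective: faster
-- what changed: Replaces the O(n^2) scan (rebuild the list without card i and re-sum it for every i) with one suffix pass of alternating sums plus one forward pass doing an O(1) check per i.
import Mathlib
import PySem

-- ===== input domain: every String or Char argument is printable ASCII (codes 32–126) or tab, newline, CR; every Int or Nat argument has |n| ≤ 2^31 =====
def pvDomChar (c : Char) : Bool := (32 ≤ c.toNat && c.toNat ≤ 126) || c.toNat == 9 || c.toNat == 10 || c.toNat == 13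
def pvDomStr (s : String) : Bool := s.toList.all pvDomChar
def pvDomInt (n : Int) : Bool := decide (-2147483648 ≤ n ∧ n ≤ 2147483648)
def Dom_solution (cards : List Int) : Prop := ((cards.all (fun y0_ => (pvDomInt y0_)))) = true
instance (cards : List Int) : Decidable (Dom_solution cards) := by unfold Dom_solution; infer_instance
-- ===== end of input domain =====

-- B replaces A's quadratic rebuild-and-resum per candidate with one suffix pass + one O(1)-check forward pass (objective: faster).

-- ===== PORT A =====
-- the while-loop: walk temp by index, adding even-index cards to kero and odd-index cards to berony
def solWhileA (temp : List Int) (cardIndex : Nat) (kero berony : Int) : Int × Int :=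
  if cardIndex < temp.length then
    if cardIndex % 2 = 0 then
      solWhileA temp (cardIndex + 1) (kero + temp.getD cardIndex 0) berony
    else
      solWhileA temp (cardIndex + 1) kero (berony + temp.getD cardIndex 0)
  else (kero, berony)
termination_by temp.length - cardIndex

-- the for-loop over i in range(len(cards)); temp = copy of cards with index i popped
def solForA (cards : List Int) (i : Nat) : Int :=
  if i < cards.length then
    let temp := cards.eraseIdx i
    let kb := solWhileA temp 0 0 0
    if kb.1 = kb.2 then (i : Int) + 1 else solForA cards (i + 1)
  else -1
termination_by cards.length - i

def solution (cards : List Int) : Int := solForA cards 0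

-- ===== PORT B =====
-- backward pass: suf[j] = cards[j] - suf[j+1]; built as a list, suf[n] = 0
def sufB : List Int → List Int
  | [] => [0]
  | c :: t => (c - (sufB t).headI) :: sufB t

-- forward pass: at step i, suf holds the tail of the suffix table starting at suf[i+1]
def solForB (pre sign : Int) (i : Int) : List Int → List Int → Int
  | [], _ => -1
  | c :: rest, suf =>
    if pre + sign * suf.headI = 0 then i + 1
    else solForB (pre + sign * c) (-sign) (i + 1) rest suf.tail

def solution_alt (cards : List Int) : Int :=
  solForB 0 1 0 cards (sufB cards).tail

-- ===== PRECONDITION & SPEC =====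
def Spec_solution (cards : List Int) (out : Int) : Prop := out = solution_alt cards
instance (cards : List Int) (out : Int) : Decidable (Spec_solution cards out) := by unfold Spec_solution; infer_instance

-- ===== CLAIM (what is proved, stated in full; the proofs are below) =====
def Claim_equal_solution : Prop := ∀ (cards : List Int), Dom_solution cards → Spec_solution cards (solution cards)

-- ===== LEMMAS AND PROOFS =====

-- alternating sum c0 - c1 + c2 - …
def altsum : List Int → Int
  | [] => 0
  | c :: t => c - altsum t

def signI (i : Nat) : Int := if i % 2 = 0 then 1 else -1

-- prefix alternating sum: Σ_{j<i} signI j * cards[j]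
def preA (cards : List Int) : Nat → Int
  | 0 => 0
  | i + 1 => preA cards i + signI i * cards.getD i 0

theorem signI_succ (i : Nat) : signI (i + 1) = -signI i := by
  unfold signI
  rcases Nat.even_or_odd i with h | h
  · simp [Nat.even_iff.mp h, Nat.succ_mod_two_eq_one_iff.mpr (Nat.even_iff.mp h)]
  · simp [Nat.odd_iff.mp h, Nat.succ_mod_two_eq_zero_iff.mpr (Nat.odd_iff.mp h)]

theorem sufB_headI (xs : List Int) : (sufB xs).headI = altsum xs := by
  cases xs with
  | nil => simp [sufB, altsum]
  | cons c t => simp [sufB, altsum, sufB_headI t]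

theorem preA_cons (c : Int) (t : List Int) (i : Nat) :
    preA (c :: t) (i + 1) = c - preA t i := by
  induction i with
  | zero => simp [preA, signI]
  | succ i ih =>
    show preA (c :: t) (i + 1) + signI (i + 1) * (c :: t).getD (i + 1) 0 = _
    rw [ih, signI_succ]
    simp [preA]
    ring

-- A's while loop computes the even/odd sums; its difference is an alternating tail sum
theorem solWhileA_diff (temp : List Int) (idx : Nat) (k b : Int) :
    (solWhileA temp idx k b).1 - (solWhileA temp idx k b).2
      = k - b + signI idx * altsum (temp.drop idx) := by
  by_cases h : idx < temp.length
  · have hdrop : temp.drop idx = temp.getD idx 0 :: temp.drop (idx + 1) := by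
      rw [List.getD_eq_getElem _ _ h]
      exact (List.getElem_cons_drop h).symm
    rw [solWhileA]
    simp only [h, if_true]
    by_cases hp : idx % 2 = 0
    · rw [if_pos hp, solWhileA_diff temp (idx + 1), hdrop, signI_succ]
      simp [altsum, signI, hp]; ring
    · rw [if_neg hp, solWhileA_diff temp (idx + 1), hdrop, signI_succ]
      simp [altsum, signI, hp]; ring
  · rw [solWhileA]
    simp [h, List.drop_eq_nil_of_le (Nat.le_of_not_lt h), altsum]
termination_by temp.length - idx

-- removing index i splits the alternating sum into prefix + signed suffix
theorem altsum_eraseIdx (xs : List Int) (i : Nat) (h : i < xs.length) :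
    altsum (xs.eraseIdx i) = preA xs i + signI i * altsum (xs.drop (i + 1)) := by
  induction i generalizing xs with
  | zero =>
    cases xs with
    | nil => simp at h
    | cons c t => simp [List.eraseIdx, preA, signI]
  | succ i ih =>
    cases xs with
    | nil => simp at h
    | cons c t =>
      have ht : i < t.length := by simpa using h
      simp only [List.eraseIdx, altsum, List.drop_succ_cons]
      rw [ih t ht, preA_cons, signI_succ]
      ring

theorem solForB_nil (pre sign i : Int) (suf : List Int) :
    solForB pre sign i [] suf = -1 := rfl

-- main correspondence between the two loops
theorem main_loop (cards : List Int) (i : Nat) :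
    solForA cards i
      = solForB (preA cards i) (signI i) (i : Int) (cards.drop i)
          ((sufB (cards.drop i)).tail) := by
  by_cases h : i < cards.length
  · have hdrop : cards.drop i = cards.getD i 0 :: cards.drop (i + 1) := by
      rw [List.getD_eq_getElem _ _ h]
      exact (List.getElem_cons_drop h).symm
    rw [solForA]
    simp only [h, if_true]
    rw [hdrop]
    have hsuf : (sufB (cards.getD i 0 :: cards.drop (i + 1))).tail
        = sufB (cards.drop (i + 1)) := by simp [sufB]
    rw [hsuf]
    unfold solForB
    rw [sufB_headI]
    have hcond : ((solWhileA (cards.eraseIdx i) 0 0 0).1 = (solWhileA (cards.eraseIdx i) 0 0 0).2)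
        ↔ (preA cards i + signI i * altsum (cards.drop (i + 1)) = 0) := by
      have hd := solWhileA_diff (cards.eraseIdx i) 0 0 0
      simp only [List.drop_zero] at hd
      rw [altsum_eraseIdx cards i h] at hd
      have hs : signI 0 = 1 := rfl
      rw [hs] at hd
      constructor <;> intro he <;> omega
    by_cases hc : preA cards i + signI i * altsum (cards.drop (i + 1)) = 0
    · rw [if_pos (hcond.mpr hc), if_pos hc]
    · rw [if_neg (fun he => hc (hcond.mp he)), if_neg hc]
      rw [main_loop cards (i + 1)]
      have hp : preA cards (i + 1) = preA cards i + signI i * cards.getD i 0 := rfl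
      rw [hp, signI_succ]
      norm_cast
  · rw [solForA]
    simp [h, List.drop_eq_nil_of_le (Nat.le_of_not_lt h), solForB_nil]
termination_by cards.length - i

-- ===== VERDICT (by name: the statement is the Claim_ definition above) =====
theorem solution_spec : Claim_equal_solution := by
  intro cards _
  unfold Spec_solution solution solution_alt
  have := main_loop cards 0
  simpa [preA, signI] using this
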